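-- pv_equiv track=rewrite | github.com/MoHossam10/End-To-End-Chatting-App | AES_Algorithm.py | Rcon
-- ===== SOURCE A (Python) =====
-- def XOR(block1,block2):
--     result_block=""
--     for index in range(len(block1)):
--         if block1[index]==block2[index]:
--             result_block+='0'
--         else:
--             result_block+='1'
--     return result_block
--
-- def Rcon(word,rcon_index):
--     resulted_word=[]
--     for index in range(len(word)):
--         if index==0:
--             hex_result = hex(int(XOR(format(int(word[index][0], 16), '08b'),format(int(rcon_table[rcon_index+1], 16), '08b')), 2))[2:]
--         else:
--             hex_result = hex(int(XOR(format(int(word[index][0], 16), '08b'),format(int("0", 16), '08b')), 2))[2:]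
--         resulted_word.append([hex_result])
--     return resulted_word
--
-- rcon_table = [
--     "01", "02", "04", "08", "10", "20", "40", "80", "1B", "36", "6C", "D8", "AB", "4D", "9A", "2F"
-- ]
-- ===== SOURCE B (Python) =====
-- rcon_table = [
--     "01", "02", "04", "08", "10", "20", "40", "80", "1B", "36", "6C", "D8", "AB", "4D", "9A", "2F"
-- ]
--
-- def Rcon(word, rcon_index):
--     if not word:
--         return []
--     r = int(rcon_table[rcon_index + 1], 16)
--     head = format(int(word[0][0], 16) ^ r, 'x')
--     return [[head]] + [[format(int(w[0], 16), 'x')] for w in word[1:]]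
-- ===== Notes on version B (the rewrite author's own statement) =====
-- stated objective: simpler
-- what changed: Replaces A's per-byte binary-string round trip (format to '08b', character-by-character comparison loop in XOR, re-parse with int(.,2)) by a single integer XOR per byte, applied once to the head with the rcon byte and via a plain comprehension to the tail.
-- outside the precondition, e.g. on Rcon([['-1']], 0): A returns [['83']], B returns [['-3']]
import Mathlib
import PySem

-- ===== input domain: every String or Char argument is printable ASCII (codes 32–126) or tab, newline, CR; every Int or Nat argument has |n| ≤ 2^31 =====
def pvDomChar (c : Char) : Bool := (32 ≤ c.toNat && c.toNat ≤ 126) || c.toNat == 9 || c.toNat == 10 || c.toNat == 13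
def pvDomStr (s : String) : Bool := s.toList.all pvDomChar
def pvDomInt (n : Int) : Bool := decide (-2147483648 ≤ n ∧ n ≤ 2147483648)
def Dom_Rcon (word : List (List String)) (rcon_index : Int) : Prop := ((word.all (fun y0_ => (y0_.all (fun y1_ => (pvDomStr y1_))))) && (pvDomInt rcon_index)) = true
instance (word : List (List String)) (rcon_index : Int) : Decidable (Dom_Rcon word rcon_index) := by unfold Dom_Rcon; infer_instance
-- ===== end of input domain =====

-- B replaces A's per-bit string XOR (binary format / compare / re-parse round trip) by one
-- integer XOR per byte with a head/tail decomposition: simpler and shorter, same values.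

-- ===== PORT A =====

def rcon_table : List String :=
  ["01","02","04","08","10","20","40","80","1B","36","6C","D8","AB","4D","9A","2F"]

-- helper XOR(block1, block2): per-index character comparison building a '0'/'1' string.
-- Exact transliteration except that block2[index] uses a default where Python raises
-- IndexError (lengths differ only on byte values > 255, excluded by Pre_Rcon).
def xorBits (block1 block2 : List Char) : List Char :=
  (PySem.List.pyRange 0 block1.length 1).foldl
    (fun result_block index =>
      result_block ++
        [if PySem.List.pyGetD block1 index ' ' = PySem.List.pyGetD block2 index ' '
         then '0' else '1']) []

-- format(v, '08b'): exact for 0 ≤ v (Pre_Rcon ensures; Python pads counting the sign char for v < 0)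
def fmt08b (v : Int) : List Char :=
  let b := PySem.Int.toBinChars v
  List.replicate (8 - b.length) '0' ++ b

def hexDigit (n : Nat) : Char := "0123456789abcdef".toList.getD n '0'

-- hex digits of n, most significant first
def hexDigits (n : Nat) : List Char :=
  if _ : n < 16 then [hexDigit n] else hexDigits (n / 16) ++ [hexDigit (n % 16)]
decreasing_by exact Nat.div_lt_self (by omega) (by omega)

-- hex(n)[2:] (and format(n, 'x')): exact for 0 ≤ n (Pre_Rcon ensures)
def hexOfInt (n : Int) : String := String.ofList (hexDigits n.toNat)

-- int(s, 16) and rcon_table[rcon_index+1]: the .getD defaults are only reached where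
-- Python raises ValueError / IndexError (excluded by Pre_Rcon)
def Rcon (word : List (List String)) (rcon_index : Int) : List (List String) :=
  (PySem.List.pyRange 0 word.length 1).foldl
    (fun resulted_word index =>
      let hex_result :=
        if index = 0 then
          hexOfInt ((PySem.Int.ofCharsBase?
            (xorBits
              (fmt08b ((PySem.Int.ofStrBase? (PySem.List.pyGetD (PySem.List.pyGetD word index []) 0 "") 16).getD 0))
              (fmt08b ((PySem.Int.ofStrBase? (PySem.List.pyGetD rcon_table (rcon_index + 1) "") 16).getD 0))) 2).getD 0)
        else
          hexOfInt ((PySem.Int.ofCharsBase?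
            (xorBits
              (fmt08b ((PySem.Int.ofStrBase? (PySem.List.pyGetD (PySem.List.pyGetD word index []) 0 "") 16).getD 0))
              (fmt08b ((PySem.Int.ofStrBase? "0" 16).getD 0))) 2).getD 0)
      resulted_word ++ [[hex_result]]) []

-- ===== PORT B =====   (transliteration of Source B; hexOfInt = format(·, 'x'), exact for 0 ≤ v)
def Rcon_alt (word : List (List String)) (rcon_index : Int) : List (List String) :=
  match word with
  | [] => []
  | w0 :: rest =>
    let r := (PySem.Int.ofStrBase? (PySem.List.pyGetD rcon_table (rcon_index + 1) "") 16).getD 0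
    let head := hexOfInt (PySem.Int.bxor ((PySem.Int.ofStrBase? (PySem.List.pyGetD w0 0 "") 16).getD 0) r)
    [[head]] ++ rest.map (fun w => [hexOfInt ((PySem.Int.ofStrBase? (PySem.List.pyGetD w 0 "") 16).getD 0)])

-- ===== PRECONDITION & SPEC =====
-- Pre_ excludes inputs where A raises (rcon_table index out of range, an element that is empty
-- or whose first string is not a hex numeral, a byte value > 255 giving IndexError in XOR) and,
-- as stated in the claim, negative hex strings: there A's character XOR treats the '-' sign of the
-- binary string as a bit — an artefact outside the natural byte domain — while B XORs the integers.
def Pre_Rcon (word : List (List String)) (rcon_index : Int) : Prop :=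
  (-17 ≤ rcon_index ∧ rcon_index ≤ 14) ∧
  ∀ w ∈ word,
    0 ≤ (PySem.Int.ofStrBase? (w.getD 0 "") 16).getD (-1) ∧
    (PySem.Int.ofStrBase? (w.getD 0 "") 16).getD (-1) ≤ 255

instance (word : List (List String)) (rcon_index : Int) : Decidable (Pre_Rcon word rcon_index) := by
  unfold Pre_Rcon; infer_instance

def pvWitness_Rcon : List (List String) × Int := ([["ab"], ["0f"], ["00"]], 0)

def Spec_Rcon (word : List (List String)) (rcon_index : Int) (out : List (List String)) : Prop := out = Rcon_alt word rcon_index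
instance (word : List (List String)) (rcon_index : Int) (out : List (List String)) : Decidable (Spec_Rcon word rcon_index out) := by unfold Spec_Rcon; infer_instance

-- ===== CLAIM (what is proved, stated in full; the proofs are below) =====
def Claim_equal_Rcon : Prop := ∀ (word : List (List String)) (rcon_index : Int), Dom_Rcon word rcon_index → Pre_Rcon word rcon_index → Spec_Rcon word rcon_index (Rcon word rcon_index)

-- ===== LEMMAS AND PROOFS =====

-- one bit of n (its parity) as a character
def bitChar (n : Nat) : Char := if n % 2 = 1 then '1' else '0'

-- the four bits of a nibble, most significant first
def bits4 (n : Nat) : List Char := [bitChar (n / 8), bitChar (n / 4), bitChar (n / 2), bitChar n]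

set_option maxRecDepth 10000 in
lemma fmt08b_eq_bits4 : ∀ a ∈ List.range 256, fmt08b (a : Int) = bits4 (a / 16) ++ bits4 (a % 16) := by decide

lemma zip_bits4 : ∀ h ∈ List.range 16, ∀ k ∈ List.range 16,
    List.zipWith (fun c d => if c = d then '0' else '1') (bits4 h) (bits4 k) = bits4 (h ^^^ k) := by decide

lemma parse_bits4 : ∀ h ∈ List.range 16, ∀ k ∈ List.range 16,
    PySem.Int.ofCharsBase? (bits4 h ++ bits4 k) 2 = some ((16 * h + k : Nat) : Int) := by decide

lemma xorBits_eq_zipWith (b1 b2 : List Char) (h : b1.length = b2.length) :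
    xorBits b1 b2 = List.zipWith (fun c d => if c = d then '0' else '1') b1 b2 := by
  unfold xorBits
  rw [PySem.List.foldl_append_singleton_eq_map, List.nil_append, PySem.List.pyRange_one,
    List.map_map]
  apply List.ext_getElem
  · simp [h]
  · intro k hk1 hk2
    simp only [List.getElem_map, List.getElem_range, List.getElem_zipWith, Function.comp]
    have hk : k < b1.length := by simpa using hk1
    rw [show ((0:Int) + (k:Int)) = ((k:Nat):Int) by omega]
    rw [PySem.List.pyGetD_natCast, PySem.List.pyGetD_natCast,
      List.getD_eq_getElem _ _ hk, List.getD_eq_getElem _ _ (h ▸ hk)]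

lemma nibble_xor (a b : Nat) : a ^^^ b = 16 * (a / 16 ^^^ b / 16) + (a % 16 ^^^ b % 16) := by
  have hlt : (a % 16 ^^^ b % 16) < 16 :=
    Nat.xor_lt_two_pow (n := 4) (Nat.mod_lt _ (by omega)) (Nat.mod_lt _ (by omega))
  have h16 : (16 : Nat) = 2 ^ 4 := by norm_num
  apply Nat.eq_of_testBit_eq
  intro i
  rw [h16] at hlt ⊢
  rw [Nat.testBit_two_pow_mul_add _ hlt]
  rcases lt_or_ge i 4 with hi | hi
  · rw [if_pos hi, Nat.testBit_xor, Nat.testBit_xor, Nat.testBit_mod_two_pow,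
      Nat.testBit_mod_two_pow]
    simp [hi]
  · rw [if_neg (Nat.not_lt.mpr hi), Nat.testBit_xor, Nat.testBit_xor,
      Nat.testBit_div_two_pow, Nat.testBit_div_two_pow, Nat.sub_add_cancel hi]

-- the whole A-side pipeline on one byte is integer XOR
lemma pipeline_eq_bxor (v r : Int) (hv0 : 0 ≤ v) (hv1 : v ≤ 255) (hr0 : 0 ≤ r) (hr1 : r ≤ 255) :
    (PySem.Int.ofCharsBase? (xorBits (fmt08b v) (fmt08b r)) 2).getD 0 = PySem.Int.bxor v r := by
  obtain ⟨a, rfl⟩ : ∃ a : Nat, v = (a : Int) := ⟨v.toNat, (Int.toNat_of_nonneg hv0).symm⟩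
  obtain ⟨b, rfl⟩ : ∃ b : Nat, r = (b : Int) := ⟨r.toNat, (Int.toNat_of_nonneg hr0).symm⟩
  have ha : a ∈ List.range 256 := List.mem_range.mpr (by omega)
  have hb : b ∈ List.range 256 := List.mem_range.mpr (by omega)
  have m16 : ∀ n : Nat, n % 16 ∈ List.range 16 :=
    fun n => List.mem_range.mpr (Nat.mod_lt _ (by omega))
  have d16 : ∀ n : Nat, n ∈ List.range 256 → n / 16 ∈ List.range 16 := fun n hn =>
    List.mem_range.mpr (Nat.div_lt_of_lt_mul (by simpa [Nat.mul_comm] using List.mem_range.mp hn))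
  have hx1 : (a / 16 ^^^ b / 16) ∈ List.range 16 := List.mem_range.mpr
    (Nat.xor_lt_two_pow (n := 4) (List.mem_range.mp (d16 a ha)) (List.mem_range.mp (d16 b hb)))
  have hx2 : (a % 16 ^^^ b % 16) ∈ List.range 16 := List.mem_range.mpr
    (Nat.xor_lt_two_pow (n := 4) (Nat.mod_lt _ (by omega)) (Nat.mod_lt _ (by omega)))
  rw [fmt08b_eq_bits4 a ha, fmt08b_eq_bits4 b hb,
    xorBits_eq_zipWith _ _ (by simp [bits4]),
    List.zipWith_append (by simp [bits4]),
    zip_bits4 _ (d16 a ha) _ (d16 b hb), zip_bits4 _ (m16 a) _ (m16 b),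
    parse_bits4 _ hx1 _ hx2, Option.getD_some, PySem.Int.bxor_natCast]
  exact_mod_cast congrArg (fun n : Nat => (n : Int)) (nibble_xor a b).symm

lemma rconByte_bounds (i : Int) (h1 : -17 ≤ i) (h2 : i ≤ 14) :
    0 ≤ (PySem.Int.ofStrBase? (PySem.List.pyGetD rcon_table (i + 1) "") 16).getD 0 ∧
    (PySem.Int.ofStrBase? (PySem.List.pyGetD rcon_table (i + 1) "") 16).getD 0 ≤ 255 := by
  interval_cases i <;> decide

lemma parse_of_pre (w : List String)
    (h0 : 0 ≤ (PySem.Int.ofStrBase? (w.getD 0 "") 16).getD (-1))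
    (h1 : (PySem.Int.ofStrBase? (w.getD 0 "") 16).getD (-1) ≤ 255) :
    ∃ x, PySem.Int.ofStrBase? (PySem.List.pyGetD w 0 "") 16 = some x ∧ 0 ≤ x ∧ x ≤ 255 := by
  rw [PySem.List.pyGetD_zero]
  cases hparse : PySem.Int.ofStrBase? (w.getD 0 "") 16 with
  | none => rw [hparse] at h0; norm_num at h0
  | some x =>
    rw [hparse] at h0 h1
    exact ⟨x, rfl, h0, h1⟩

-- ===== VERDICT (by name: the statement is the Claim_ definition above) =====
set_option maxHeartbeats 1600000 in
theorem Rcon_spec : Claim_equal_Rcon := by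
  unfold Claim_equal_Rcon
  intro word i _ hpre
  obtain ⟨⟨hi1, hi2⟩, hw⟩ := hpre
  unfold Spec_Rcon
  cases word with
  | nil => rfl
  | cons w0 rest =>
    obtain ⟨hr0, hr255⟩ := rconByte_bounds i hi1 hi2
    simp only [Rcon, Rcon_alt]
    rw [PySem.List.foldl_append_singleton_eq_map, List.nil_append]
    apply List.ext_getElem
    · simp [PySem.List.length_pyRange_one]
    · intro k hk1 hk2
      rw [List.getElem_map, PySem.List.getElem_pyRange_one]
      have hklen : k < rest.length + 1 := by
        simpa [PySem.List.length_pyRange_one] using hk1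
      cases k with
      | zero =>
        obtain ⟨x, hx, hx0, hx255⟩ := parse_of_pre w0
          (hw w0 (List.mem_cons_self)).1 (hw w0 (List.mem_cons_self)).2
        simp only [Nat.cast_zero, add_zero, PySem.List.pyGetD_zero_cons]
        rw [hx, Option.getD_some, pipeline_eq_bxor x _ hx0 hx255 hr0 hr255]
        simp
      | succ k =>
        have hkr : k < rest.length := by omega
        have hmem : rest[k] ∈ w0 :: rest :=
          List.mem_cons_of_mem _ (List.getElem_mem hkr)
        obtain ⟨x, hx, hx0, hx255⟩ := parse_of_pre rest[k] (hw _ hmem).1 (hw _ hmem).2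
        have hne : (0 : Int) + ((k + 1 : Nat) : Int) ≠ 0 := by push_cast; omega
        have hidx : PySem.List.pyGetD (w0 :: rest) ((0 : Int) + ((k + 1 : Nat) : Int)) [] = rest[k] := by
          rw [show (0 : Int) + ((k + 1 : Nat) : Int) = ((k + 1 : Nat) : Int) by omega,
            PySem.List.pyGetD_natCast, List.getD_cons_succ, List.getD_eq_getElem _ _ hkr]
        have h0parse : PySem.Int.ofStrBase? "0" 16 = some 0 := by decide
        simp only [if_neg hne, hidx, h0parse, Option.getD_some]
        rw [hx, Option.getD_some, pipeline_eq_bxor x 0 hx0 hx255 le_rfl (by norm_num)]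
        simp [hx]
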